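-- pv_equiv track=rewrite | github.com/super-quantum/rmsynth | src/api/python/rmsynth/osd.py | _encode_from_coeffs
-- ===== SOURCE A (Python) =====
-- from typing import List, Tuple
--
-- def _encode_from_coeffs(rows: List[int], a_bits: int, K: int) -> int:
--     """
--     Return punctured codeword int: XOR rows[i] for all i where bit i in
--     a_bits is 1.
--     """
--     cw = 0
--     x = a_bits
--     while x:
--         lsb = x & -x
--         i = lsb.bit_length() - 1
--         cw ^= rows[i]
--         x ^= lsb
--     return cw
-- ===== SOURCE B (Python) =====
-- from typing import List, Tuple
--
-- def _encode_from_coeffs(rows: List[int], a_bits: int, K: int) -> int: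
--     """
--     Return punctured codeword int: XOR rows[i] for all i where bit i in
--     a_bits is 1 — divide and conquer: split rows in half, combine the
--     XOR of the low half (selected by a_bits' low bits) with the XOR of
--     the high half (selected by a_bits' high bits).
--     """
--     if a_bits == 0:
--         return 0
--     if len(rows) <= 1:
--         return rows[0]
--     h = len(rows) // 2
--     low = a_bits & ((1 << h) - 1)
--     high = a_bits >> h
--     return _encode_from_coeffs(rows[:h], low, K) ^ _encode_from_coeffs(rows[h:], high, K)
-- ===== Notes on version B (the rewrite author's own statement) =====
-- stated objective: alternative
-- what changed: Replaces A's sequential lowest-set-bit extraction loop (x & -x, bit_length, rows[i]) with a divide-and-conquer recursion that splits rows in half and XORs the codeword of the low half (selected by the low bits of a_bits) with that of the high half (selected by the shifted-down high bits).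
import Mathlib
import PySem

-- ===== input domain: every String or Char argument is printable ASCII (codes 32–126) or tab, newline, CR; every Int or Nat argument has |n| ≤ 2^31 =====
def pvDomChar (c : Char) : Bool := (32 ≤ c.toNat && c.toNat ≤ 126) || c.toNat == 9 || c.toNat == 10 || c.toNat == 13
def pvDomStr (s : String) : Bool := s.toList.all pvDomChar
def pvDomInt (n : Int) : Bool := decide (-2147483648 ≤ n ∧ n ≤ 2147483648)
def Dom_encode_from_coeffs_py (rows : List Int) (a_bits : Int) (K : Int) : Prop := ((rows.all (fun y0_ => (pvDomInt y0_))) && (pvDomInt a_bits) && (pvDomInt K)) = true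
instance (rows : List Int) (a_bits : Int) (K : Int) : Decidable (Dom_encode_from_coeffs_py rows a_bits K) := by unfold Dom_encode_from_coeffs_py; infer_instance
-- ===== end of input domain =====

-- B replaces A's lowest-set-bit extraction loop (x & -x, bit_length, rows[i]) by a
-- divide-and-conquer recursion: split rows in half and XOR the result of the low half
-- (selected by a_bits' low bits) with that of the high half (objective: alternative).

-- ===== PORT A =====
-- fuel-based transliteration of A's `while x:` loop; fuel = |a_bits| + 1 always suffices on
-- the terminating (Pre_) inputs, since x strictly decreases each iteration there.
def pvALoop (rows : List Int) : Nat → Int → Int → Int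
  | 0, cw, _ => cw
  | fuel + 1, cw, x =>
    if x = 0 then cw
    else
      let lsb := PySem.Int.band x (-x)                       -- lsb = x & -x
      let i : Int := (PySem.Int.bitLength lsb : Int) - 1     -- i = lsb.bit_length() - 1
      match PySem.List.pyGet? rows i with
      | none => cw                                           -- rows[i] raises IndexError (outside Pre_)
      | some r => pvALoop rows fuel (PySem.Int.bxor cw r) (PySem.Int.bxor x lsb)

def encode_from_coeffs_py (rows : List Int) (a_bits : Int) (K : Int) : Int :=
  pvALoop rows (a_bits.natAbs + 1) 0 a_bits

-- ===== PORT B =====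
-- rows[0] in Source B raises IndexError on empty rows (only reachable outside Pre_); the
-- port returns the default 0 there via getD.
def encode_from_coeffs_py_alt (rows : List Int) (a_bits : Int) (K : Int) : Int :=
  if a_bits = 0 then 0
  else if _hr : rows.length ≤ 1 then (PySem.List.pyGet? rows 0).getD 0
  else -- h = len(rows)//2; low = a_bits & ((1 << h) - 1); high = a_bits >> h (inlined)
    PySem.Int.bxor
      (encode_from_coeffs_py_alt (PySem.List.slice rows none (some ((rows.length / 2 : Nat) : Int)))
        (PySem.Int.band a_bits (((1 : Int) <<< (rows.length / 2)) - 1)) K)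
      (encode_from_coeffs_py_alt (PySem.List.slice rows (some ((rows.length / 2 : Nat) : Int)) none)
        (a_bits >>> (rows.length / 2)) K)
termination_by rows.length
decreasing_by
  · simp only [PySem.List.slice_to_natCast, List.length_take]; omega
  · simp only [PySem.List.slice_from_natCast, List.length_drop]; omega

-- ===== PRECONDITION & SPEC =====
-- Pre_ excludes exactly the inputs where A raises: a negative a_bits (the loop walks the
-- infinite two's-complement ones until rows[i] raises IndexError) and an a_bits with a set
-- bit at/above len(rows) (rows[i] raises IndexError there); A returns on everything admitted.
def Pre_encode_from_coeffs_py (rows : List Int) (a_bits : Int) (K : Int) : Prop :=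
  0 ≤ a_bits ∧ a_bits < 2 ^ rows.length

instance (rows : List Int) (a_bits : Int) (K : Int) : Decidable (Pre_encode_from_coeffs_py rows a_bits K) := by
  unfold Pre_encode_from_coeffs_py; infer_instance

def pvWitness_encode_from_coeffs_py : List Int × Int × Int := ([3, -5, 9], 5, 3)

def Spec_encode_from_coeffs_py (rows : List Int) (a_bits : Int) (K : Int) (out : Int) : Prop := out = encode_from_coeffs_py_alt rows a_bits K
instance (rows : List Int) (a_bits : Int) (K : Int) (out : Int) : Decidable (Spec_encode_from_coeffs_py rows a_bits K out) := by unfold Spec_encode_from_coeffs_py; infer_instance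

-- ===== CLAIM (what is proved, stated in full; the proofs are below) =====
def Claim_equal_encode_from_coeffs_py : Prop := ∀ (rows : List Int) (a_bits : Int) (K : Int), Dom_encode_from_coeffs_py rows a_bits K → Pre_encode_from_coeffs_py rows a_bits K → Spec_encode_from_coeffs_py rows a_bits K (encode_from_coeffs_py rows a_bits K)

-- ===== LEMMAS AND PROOFS =====

-- common Nat reference recursion: scan rows, low bit decides, halve
def pvCN : List Int → Int → Nat → Int
  | [], cw, _ => cw
  | r :: rest, cw, n => pvCN rest (if n % 2 = 1 then PySem.Int.bxor cw r else cw) (n / 2)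

theorem pvCN_zero (rows : List Int) (cw : Int) : pvCN rows cw 0 = cw := by
  induction rows generalizing cw with
  | nil => rfl
  | cons r rest ih => simp [pvCN, ih]

-- ----- PySem.Int.bxor is associative (via the magnitude/sign decomposition) -----
def pvDec (n : Nat) (s : Bool) : Int := if s then -(n : Int) - 1 else (n : Int)
def pvMag (a : Int) : Nat := if 0 ≤ a then a.toNat else (-a - 1).toNat
def pvSgn (a : Int) : Bool := decide (a < 0)

theorem pvBxor_dec (a b : Int) :
    PySem.Int.bxor a b = pvDec (pvMag a ^^^ pvMag b) (xor (pvSgn a) (pvSgn b)) := by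
  unfold PySem.Int.bxor pvDec pvMag pvSgn
  split_ifs with h1 h2 h2 <;> simp_all <;> omega

theorem pvMag_dec (n : Nat) (s : Bool) : pvMag (pvDec n s) = n := by
  cases s <;> simp [pvDec, pvMag] <;> omega

theorem pvSgn_dec (n : Nat) (s : Bool) : pvSgn (pvDec n s) = s := by
  cases s <;> simp [pvDec, pvSgn] <;> omega

theorem pvBxor_assoc (a b c : Int) :
    PySem.Int.bxor (PySem.Int.bxor a b) c = PySem.Int.bxor a (PySem.Int.bxor b c) := by
  rw [pvBxor_dec b c, pvBxor_dec a b, pvBxor_dec a (pvDec _ _), pvBxor_dec (pvDec _ _) c]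
  rw [pvMag_dec, pvSgn_dec, pvMag_dec, pvSgn_dec]
  rw [Nat.xor_assoc, Bool.xor_assoc]

theorem pvBxor_zero_left (r : Int) : PySem.Int.bxor 0 r = r := by
  rw [PySem.Int.bxor_comm, PySem.Int.bxor_zero]

-- pull the accumulator out of pvCN
theorem pvCN_acc (rows : List Int) (cw : Int) (n : Nat) :
    pvCN rows cw n = PySem.Int.bxor cw (pvCN rows 0 n) := by
  induction rows generalizing cw n with
  | nil => simp [pvCN, PySem.Int.bxor_zero]
  | cons r rest ih =>
    simp only [pvCN]
    split_ifs
    · rw [ih (PySem.Int.bxor cw r), ih (PySem.Int.bxor 0 r), pvBxor_zero_left, pvBxor_assoc]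
    · exact ih cw (n / 2)

-- pvCN over an append: first list consumes the low bits
theorem pvCN_append (as bs : List Int) (cw : Int) (n : Nat) :
    pvCN (as ++ bs) cw n = pvCN bs (pvCN as cw n) (n / 2 ^ as.length) := by
  induction as generalizing cw n with
  | nil => simp [pvCN]
  | cons r rest ih =>
    simp only [List.cons_append, pvCN, ih, List.length_cons]
    congr 1
    rw [Nat.div_div_eq_div_mul]
    congr 1
    rw [pow_succ]
    ring

-- pvCN only reads n mod 2^len
theorem pvCN_mod (rows : List Int) (cw : Int) (n : Nat) :
    pvCN rows cw n = pvCN rows cw (n % 2 ^ rows.length) := by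
  induction rows generalizing cw n with
  | nil => rfl
  | cons r rest ih =>
    simp only [pvCN, List.length_cons]
    have hp : (2:Nat) ^ (rest.length + 1) = 2 * 2 ^ rest.length := by rw [pow_succ]; ring
    have h2 : n % 2 ^ (rest.length + 1) % 2 = n % 2 := by
      rw [hp, Nat.mod_mod_of_dvd n (Dvd.intro _ rfl)]
    have hd : n % 2 ^ (rest.length + 1) / 2 = n / 2 % 2 ^ rest.length := by
      rw [hp]; exact Nat.mod_mul_right_div_self n 2 (2 ^ rest.length)
    simp only [h2, hd]
    exact ih _ _

-- B's divide-and-conquer equals pvCN on nonnegative in-range inputs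
theorem pvAlt_eq (L : Nat) (rows : List Int) (hL : rows.length = L) (K : Int)
    (n : Nat) (hn : n < 2 ^ L) :
    encode_from_coeffs_py_alt rows ((n : Nat) : Int) K = pvCN rows 0 n := by
  induction L using Nat.strong_induction_on generalizing rows n with
  | _ L IH =>
    unfold encode_from_coeffs_py_alt
    by_cases hz : n = 0
    · subst hz
      rw [if_pos (by norm_num), pvCN_zero]
    · rw [if_neg (by exact_mod_cast hz)]
      by_cases h1 : rows.length ≤ 1
      · rw [dif_pos h1]
        have hL1 : L = 1 := by
          rcases Nat.lt_or_ge L 1 with h | h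
          · interval_cases L <;> omega
          · omega
        subst hL1
        have hn1 : n = 1 := by omega
        subst hn1
        cases rows with
        | nil => simp at hL
        | cons r rest =>
          have : rest = [] := by
            cases rest with
            | nil => rfl
            | cons _ _ => simp at hL
          subst this
          simp [pvCN, pvBxor_zero_left]
      · rw [dif_neg h1]
        have hlen : rows.length = L := hL
        have hL2 : 2 ≤ L := by omega
        set h := rows.length / 2 with hh
        have hh1 : 1 ≤ h := by omega
        have hhL : h < L := by omega
        -- low bits: band with the mask is n % 2^h
        have hmask : ((1:Int) <<< h) - 1 = ((2 ^ h - 1 : Nat) : Int) := by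
          rw [Int.shiftLeft_eq]
          have : (1:Nat) ≤ 2 ^ h := Nat.one_le_two_pow
          push_cast [this]
          ring
        have hlow : PySem.Int.band ((n : Nat) : Int) (((1:Int) <<< h) - 1)
            = ((n % 2 ^ h : Nat) : Int) := by
          rw [hmask, PySem.Int.band_natCast, Nat.and_two_pow_sub_one_eq_mod]
        have hhigh : (((n : Nat) : Int) >>> h) = ((n / 2 ^ h : Nat) : Int) := by
          have : ((n : Nat) : Int) >>> h = (((n >>> h : Nat) : Nat) : Int) := Int.mem_toNat?.mp rfl
          rw [this, Nat.shiftRight_eq_div_pow]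
        rw [hlow, hhigh, PySem.List.slice_to_natCast, PySem.List.slice_from_natCast]
        have htake : (rows.take h).length = h := by
          rw [List.length_take]; omega
        have hdrop : (rows.drop h).length = L - h := by
          rw [List.length_drop]; omega
        have hb1 : n % 2 ^ h < 2 ^ h := Nat.mod_lt _ (Nat.two_pow_pos h)
        have hb2 : n / 2 ^ h < 2 ^ (L - h) := by
          rw [Nat.div_lt_iff_lt_mul (Nat.two_pow_pos h), ← pow_add]
          have hsum : L - h + h = L := by omega
          rw [hsum]
          exact hn
        rw [IH h hhL (rows.take h) htake (n % 2 ^ h) hb1,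
            IH (L - h) (by omega) (rows.drop h) hdrop (n / 2 ^ h) hb2]
        conv_rhs => rw [← List.take_append_drop h rows]
        rw [pvCN_append, htake, pvCN_mod (rows.take h) 0 n, htake,
            pvCN_acc (rows.drop h) (pvCN (rows.take h) 0 (n % 2 ^ h)) (n / 2 ^ h)]

-- ----- A-side: the lowest-set-bit loop also equals pvCN -----

-- testBit of doubles at successor positions
theorem pvTB_two_mul_succ (a i : Nat) : (2 * a).testBit (i + 1) = a.testBit i := by
  rw [← Nat.testBit_div_two]
  congr 1
  omega
theorem pvTB_two_mul_add_one_succ (a i : Nat) : (2 * a + 1).testBit (i + 1) = a.testBit i := by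
  rw [← Nat.testBit_div_two]
  congr 1
  omega

-- n odd ⇒ n &&& (n-1) = n - 1
theorem pvAnd_pred_odd (m : Nat) (hm : m % 2 = 1) : m &&& (m - 1) = m - 1 := by
  obtain ⟨a, rfl⟩ : ∃ a, m = 2 * a + 1 := ⟨m / 2, by omega⟩
  have h1 : 2 * a + 1 - 1 = 2 * a := by omega
  rw [h1]
  apply Nat.eq_of_testBit_eq
  intro i
  cases i with
  | zero => simp [Nat.testBit_and]
  | succ i => simp [pvTB_two_mul_succ, pvTB_two_mul_add_one_succ]

-- n = 2^k·m, m odd ⇒ n &&& (n-1) = n - 2^k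
theorem pvAnd_pred (k m : Nat) (hm : m % 2 = 1) :
    (2 ^ k * m) &&& (2 ^ k * m - 1) = 2 ^ k * m - 2 ^ k := by
  induction k generalizing m with
  | zero => simpa using pvAnd_pred_odd m hm
  | succ k ih =>
    have hn : 2 ^ (k + 1) * m = 2 * (2 ^ k * m) := by ring
    have hpos : 0 < 2 ^ k * m := Nat.mul_pos (Nat.two_pow_pos k) (by omega)
    have hpred : 2 * (2 ^ k * m) - 1 = 2 * (2 ^ k * m - 1) + 1 := by omega
    rw [hn, hpred]
    have hbits : (2 * (2 ^ k * m)) &&& (2 * (2 ^ k * m - 1) + 1) = 2 * ((2 ^ k * m) &&& (2 ^ k * m - 1)) := by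
      apply Nat.eq_of_testBit_eq
      intro i
      cases i with
      | zero => simp [Nat.testBit_and]
      | succ i => simp [pvTB_two_mul_succ, pvTB_two_mul_add_one_succ]
    rw [hbits, ih m hm]
    have h2k : 2 ^ k ≤ 2 ^ k * m := Nat.le_mul_of_pos_right _ (by omega)
    omega

-- n = 2^k·m, m odd ⇒ n ^^^ 2^k = n - 2^k
theorem pvXor_two_pow (k m : Nat) (hm : m % 2 = 1) :
    (2 ^ k * m) ^^^ 2 ^ k = 2 ^ k * m - 2 ^ k := by
  induction k generalizing m with
  | zero =>
    simp only [pow_zero, one_mul]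
    obtain ⟨a, rfl⟩ : ∃ a, m = 2 * a + 1 := ⟨m / 2, by omega⟩
    have h1 : 2 * a + 1 - 1 = 2 * a := by omega
    rw [h1]
    apply Nat.eq_of_testBit_eq
    intro i
    cases i with
    | zero =>
      simp [Nat.testBit_zero]
      omega
    | succ i =>
      have : (1 : Nat).testBit (i + 1) = false := by
        simp [← Nat.testBit_div_two]
      simp [Nat.testBit_xor, this, pvTB_two_mul_succ, pvTB_two_mul_add_one_succ]
  | succ k ih =>
    have hn : 2 ^ (k + 1) * m = 2 * (2 ^ k * m) := by ring
    have hp : (2 : Nat) ^ (k + 1) = 2 * 2 ^ k := by ring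
    rw [hn, hp]
    have hbits : (2 * (2 ^ k * m)) ^^^ (2 * 2 ^ k) = 2 * ((2 ^ k * m) ^^^ 2 ^ k) := by
      apply Nat.eq_of_testBit_eq
      intro i
      cases i with
      | zero => simp [Nat.testBit_xor]
      | succ i => simp [pvTB_two_mul_succ]
    rw [hbits, ih m hm]
    have h2k : 2 ^ k ≤ 2 ^ k * m := Nat.le_mul_of_pos_right _ (by omega)
    omega

-- lsb: for n = 2^k·m > 0, m odd:  (↑n) & (-↑n) = ↑(2^k)
theorem pvBand_neg (k m : Nat) (hm : m % 2 = 1) :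
    PySem.Int.band ((2 ^ k * m : Nat) : Int) (-((2 ^ k * m : Nat) : Int)) = ((2 ^ k : Nat) : Int) := by
  have hpos : 0 < 2 ^ k * m := Nat.mul_pos (Nat.two_pow_pos k) (by omega)
  have h2k : 2 ^ k ≤ 2 ^ k * m := Nat.le_mul_of_pos_right _ (by omega)
  unfold PySem.Int.band
  rw [if_pos (Int.natCast_nonneg _), if_neg (by omega)]
  have h1 : (-(-((2 ^ k * m : Nat) : Int)) - 1).toNat = 2 ^ k * m - 1 := by omega
  have h2 : (((2 ^ k * m : Nat) : Int)).toNat = 2 ^ k * m := by omega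
  rw [h1, h2, pvAnd_pred k m hm]
  have h3 : 2 ^ k * m - (2 ^ k * m - 2 ^ k) = 2 ^ k := Nat.sub_sub_self h2k
  rw [h3]

-- bit_length(2^k) = k + 1
theorem pvBitLength_two_pow (k : Nat) : PySem.Int.bitLength ((2 ^ k : Nat) : Int) = k + 1 := by
  induction k with
  | zero =>
    rw [show ((2:Nat)^0 : Nat) = 1 by norm_num, PySem.Int.bitLength_natCast (by omega : 0 < 1)]
    norm_num [PySem.Int.bitLength_zero]
  | succ k ih =>
    rw [PySem.Int.bitLength_natCast (Nat.two_pow_pos (k+1))]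
    have : 2 ^ (k + 1) / 2 = 2 ^ k := by
      rw [pow_succ]; omega
    rw [this, ih]

-- stepping pvCN: lowest set bit k gets cleared and rows[k] folded in
theorem pvCN_step (k : Nat) (rows : List Int) (m : Nat) (cw : Int)
    (hm : m % 2 = 1) (hk : k < rows.length) :
    pvCN rows cw (2 ^ k * m) = pvCN rows (PySem.Int.bxor cw (rows.getD k 0)) (2 ^ k * m - 2 ^ k) := by
  induction k generalizing rows m cw with
  | zero =>
    cases rows with
    | nil => simp at hk
    | cons r rest =>
      simp only [pow_zero, one_mul, pvCN, List.getD]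
      rw [if_pos hm, if_neg (by omega)]
      congr 1
      omega
  | succ k ih =>
    cases rows with
    | nil => simp at hk
    | cons r rest =>
      have hmod : (2 ^ (k + 1) * m) % 2 = 0 := by
        have : 2 ^ (k + 1) * m = 2 * (2 ^ k * m) := by ring
        omega
      have h2k : 2 ^ (k + 1) ≤ 2 ^ (k + 1) * m := Nat.le_mul_of_pos_right _ (by omega)
      have hmod' : (2 ^ (k + 1) * m - 2 ^ (k + 1)) % 2 = 0 := by
        have h1 : 2 ^ (k + 1) * m = 2 * (2 ^ k * m) := by ring
        have h2 : (2 : Nat) ^ (k + 1) = 2 * 2 ^ k := by ring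
        omega
      simp only [pvCN, List.getD]
      rw [if_neg (by omega), if_neg (by omega)]
      have hd1 : 2 ^ (k + 1) * m / 2 = 2 ^ k * m := by
        have : 2 ^ (k + 1) * m = 2 * (2 ^ k * m) := by ring
        omega
      have hd2 : (2 ^ (k + 1) * m - 2 ^ (k + 1)) / 2 = 2 ^ k * m - 2 ^ k := by
        have h1 : 2 ^ (k + 1) * m = 2 * (2 ^ k * m) := by ring
        have h2 : (2 : Nat) ^ (k + 1) = 2 * 2 ^ k := by ring
        omega
      rw [hd1, hd2]
      exact ih rest m cw hm (by simpa using hk)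

-- A's loop equals pvCN given enough fuel and all set bits < rows.length
theorem pvALoop_eq (rows : List Int) (n fuel : Nat) (cw : Int)
    (hfuel : n < fuel) (hlt : n < 2 ^ rows.length) :
    pvALoop rows fuel cw (n : Int) = pvCN rows cw n := by
  induction n using Nat.strong_induction_on generalizing cw fuel with
  | _ n IH =>
    cases fuel with
    | zero => omega
    | succ fuel =>
      by_cases hz : n = 0
      · subst hz
        simp [pvALoop, pvCN_zero]
      · obtain ⟨k, m, hodd, hn⟩ := Nat.exists_eq_two_pow_mul_odd (hz : n ≠ 0)
        have hm : m % 2 = 1 := Nat.odd_iff.mp hodd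
        subst hn
        have hpos : 0 < 2 ^ k * m := Nat.mul_pos (Nat.two_pow_pos k) (by omega)
        have h2k : 2 ^ k ≤ 2 ^ k * m := Nat.le_mul_of_pos_right _ (by omega)
        have hklen : k < rows.length := by
          by_contra hc
          have : 2 ^ rows.length ≤ 2 ^ k := Nat.pow_le_pow_right (by omega) (by omega)
          omega
        simp only [pvALoop]
        rw [if_neg (by exact_mod_cast (by omega : ((2 ^ k * m : Nat) : Int) ≠ 0))]
        rw [pvBand_neg k m hm, pvBitLength_two_pow k]
        have hidx : ((k + 1 : Nat) : Int) - 1 = ((k : Nat) : Int) := by push_cast; ring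
        rw [hidx, PySem.List.pyGet?_natCast, List.getElem?_eq_getElem hklen]
        rw [PySem.Int.bxor_natCast, pvXor_two_pow k m hm]
        have hsub : 2 ^ k * m - 2 ^ k < 2 ^ k * m := Nat.sub_lt hpos (Nat.two_pow_pos k)
        have hf2 : 2 ^ k * m - 2 ^ k < fuel := Nat.lt_of_lt_of_le hsub (by omega)
        have hlt2 : 2 ^ k * m - 2 ^ k < 2 ^ rows.length := lt_of_le_of_lt (Nat.sub_le _ _) hlt
        show pvALoop rows fuel (PySem.Int.bxor cw (rows[k]'hklen)) ((2 ^ k * m - 2 ^ k : Nat) : Int)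
          = pvCN rows cw (2 ^ k * m)
        rw [IH (2 ^ k * m - 2 ^ k) hsub _ _ hf2 hlt2]
        rw [pvCN_step k rows m cw hm hklen]
        congr 2
        exact (List.getD_eq_getElem rows 0 hklen).symm

-- ===== VERDICT (by name: the statement is the Claim_ definition above) =====
theorem encode_from_coeffs_py_spec : Claim_equal_encode_from_coeffs_py := by
  intro rows a_bits K _ hpre
  obtain ⟨h0, hlt⟩ := hpre
  unfold Spec_encode_from_coeffs_py encode_from_coeffs_py
  obtain ⟨n, rfl⟩ := Int.eq_ofNat_of_zero_le h0
  have hltn : n < 2 ^ rows.length := by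
    have : ((n : Int)) < ((2 ^ rows.length : Nat) : Int) := by push_cast; exact_mod_cast hlt
    exact_mod_cast this
  have hfuel : n < (Int.natAbs (n : Int)) + 1 := by simp
  rw [pvALoop_eq rows n _ 0 hfuel hltn, pvAlt_eq rows.length rows rfl K n hltn]
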